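-- pv_equiv track=rewrite | github.com/alemiaschi/nonce-stories | scripts/build_stories_data.py | update_deep_solved_states
-- ===== SOURCE A (Python) =====
-- def is_deep_solved(story_id: str, story_tree: dict) -> bool:
--     """Recursively check if all nonce word branches are expanded."""
--     story = story_tree.get(story_id)
--     if not story:
--         return False
--     children = story.get("children", {})
--     for lemma, child_id in children.items():
--         if child_id is None:
--             return False
--         if not is_deep_solved(child_id, story_tree):
--             return False
--     return True
--
-- def update_deep_solved_states(tokens: list[dict], story_id: str, story_tree: dict) -> list[dict]:
--     """
--     After initial tokenization, upgrade 'expanded' nonce tokens to 'deep_solved'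
--     where applicable.
--     """
--     updated = []
--     for token in tokens:
--         if token.get("type") == "nonce" and token.get("state") == "expanded":
--             child = token.get("child_story")
--             if child and is_deep_solved(child, story_tree):
--                 token = dict(token)
--                 token["state"] = "deep_solved"
--         updated.append(token)
--     return updated
-- ===== SOURCE B (Python) =====
-- def update_deep_solved_states(tokens: list[dict], story_id: str, story_tree: dict) -> list[dict]:
--     """
--     Compute the set of deep-solved story ids once, by bottom-up fixpoint
--     iteration over the whole tree (instead of one recursive DFS per token),
--     then upgrade tokens by membership in that set.
--     """
--     def ok(story, solved_set):
--         if not story: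
--             return False
--         return all(c is not None and c in solved_set
--                    for c in story.get("children", {}).values())
--
--     solved = []
--     sset = set()
--     for _ in range(len(story_tree) + 1):
--         new = [sid for sid, story in story_tree.items() if ok(story, sset)]
--         if new == solved:
--             break
--         solved, sset = new, set(new)
--
--     updated = []
--     for token in tokens:
--         if token.get("type") == "nonce" and token.get("state") == "expanded":
--             child = token.get("child_story")
--             if child and child in sset:
--                 token = {**token, "state": "deep_solved"}
--         updated.append(token)
--     return updated
-- ===== Notes on version B (the rewrite author's own statement) =====
-- stated objective: alternative
-- what changed: B replaces A's per-token recursive DFS (is_deep_solved re-run from scratch for every token) by computing the set of deep-solved story ids once, as a bottom-up fixpoint iteration over the whole tree with early exit on stabilisation, and then upgrading each token with a single set-membership test.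
import Mathlib
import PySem

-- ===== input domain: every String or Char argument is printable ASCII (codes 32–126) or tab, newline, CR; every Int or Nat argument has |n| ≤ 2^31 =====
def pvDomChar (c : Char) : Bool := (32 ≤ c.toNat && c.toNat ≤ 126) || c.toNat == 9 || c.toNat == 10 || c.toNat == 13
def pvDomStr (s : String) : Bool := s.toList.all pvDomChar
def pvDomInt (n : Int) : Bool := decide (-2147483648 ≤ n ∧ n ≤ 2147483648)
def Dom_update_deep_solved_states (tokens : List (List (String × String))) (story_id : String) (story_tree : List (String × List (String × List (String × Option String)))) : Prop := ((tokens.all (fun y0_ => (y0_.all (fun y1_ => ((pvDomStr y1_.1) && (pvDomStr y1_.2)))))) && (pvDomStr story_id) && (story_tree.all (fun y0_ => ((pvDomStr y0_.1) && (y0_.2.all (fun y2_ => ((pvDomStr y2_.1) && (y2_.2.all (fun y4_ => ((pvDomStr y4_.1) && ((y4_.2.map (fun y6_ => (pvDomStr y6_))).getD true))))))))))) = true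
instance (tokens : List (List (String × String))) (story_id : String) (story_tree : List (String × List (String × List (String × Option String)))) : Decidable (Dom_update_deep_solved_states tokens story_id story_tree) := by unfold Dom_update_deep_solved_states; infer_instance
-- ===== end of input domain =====

-- B computes the set of deep-solved story ids once by a bottom-up fixpoint iteration over the
-- whole tree (with early exit on stabilisation) instead of A's one recursive DFS per token.

-- ===== PORT A =====
-- is_deep_solved; the fuel argument only makes the recursion total in Lean: on the inputs
-- admitted by Pre_ (acyclic children graph) a start fuel of size+1 is never exhausted.
def pvIsDeepSolved (d : PySem.Dict String (List (String × List (String × Option String)))) : Nat → String → Bool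
  | 0, _ => false
  | fuel+1, sid =>
    match d.get? sid with
    | none => false                                  -- story is None → falsy
    | some story =>
      if story.isEmpty then false                    -- story == {} → falsy
      else (PySem.Dict.ofList story |>.getD "children" [] |> PySem.Dict.ofList).items.all
        (fun p => match p.2 with
          | none => false                            -- child_id is None
          | some cid => pvIsDeepSolved d fuel cid)

def update_deep_solved_states (tokens : List (List (String × String))) (story_id : String) (story_tree : List (String × List (String × List (String × Option String)))) : List (List (String × String)) :=
  let d := PySem.Dict.ofList story_tree
  tokens.map (fun tok =>
    let t := PySem.Dict.ofList tok
    if t.get? "type" == some "nonce" && t.get? "state" == some "expanded" then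
      match t.get? "child_story" with
      | some c =>
        if c ≠ "" && pvIsDeepSolved d (story_tree.length + 1) c then
          (t.insert "state" "deep_solved").items     -- token = dict(token); token["state"] = …
        else t.items
      | none => t.items
    else t.items)

-- ===== PORT B =====
-- ok(story, solved): all children expanded and already known solved
def pvOk (solved : List String) (story : List (String × List (String × Option String))) : Bool :=
  if story.isEmpty then false
  else (PySem.Dict.ofList ((PySem.Dict.ofList story).getD "children" [])).values.all
    (fun c => match c with
      | none => false
      | some cid => solved.contains cid)             -- 'c is not None and c in solved_set'

-- one round: [sid for sid, story in story_tree.items() if ok(story, solved)]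
def pvStep (d : PySem.Dict String (List (String × List (String × Option String)))) (solved : List String) : List String :=
  (d.items.filter (fun p => pvOk solved p.2)).map Prod.fst

-- the 'for _ in range(len(story_tree)+1)' loop with its early 'break' on stabilisation
def pvLoop (d : PySem.Dict String (List (String × List (String × Option String)))) : Nat → List String → List String
  | 0, s => s
  | k+1, s =>
    let new := pvStep d s
    if new = s then s else pvLoop d k new

def update_deep_solved_states_alt (tokens : List (List (String × String))) (story_id : String) (story_tree : List (String × List (String × List (String × Option String)))) : List (List (String × String)) :=
  let d := PySem.Dict.ofList story_tree
  let solved := pvLoop d (story_tree.length + 1) []  -- membership in solved = membership in sset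
  tokens.map (fun tok =>
    let t := PySem.Dict.ofList tok
    if t.get? "type" == some "nonce" && t.get? "state" == some "expanded" then
      match t.get? "child_story" with
      | some c =>
        if c ≠ "" && solved.contains c then
          (t.insert "state" "deep_solved").items     -- token = {**token, "state": …}
        else t.items
      | none => t.items
    else t.items)

-- ===== PRECONDITION & SPEC =====
-- direct successors of a node in the children graph of story_tree
def pvSuccs (d : PySem.Dict String (List (String × List (String × Option String)))) (k : String) : List String :=
  match d.get? k with
  | none => []
  | some story => ((PySem.Dict.ofList ((PySem.Dict.ofList story).getD "children" [])).values).filterMap (fun x => x)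

-- close a node set under successors, n rounds
def pvExpand (d : PySem.Dict String (List (String × List (String × Option String)))) : Nat → List String → List String
  | 0, s => s
  | n+1, s => pvExpand d n (PySem.Set.update s (s.flatMap (pvSuccs d)))

-- child stories from which A starts its recursive subtree walk
def pvRoots (tokens : List (List (String × String))) : List String :=
  tokens.filterMap (fun tok =>
    let t := PySem.Dict.ofList tok
    if t.get? "type" == some "nonce" && t.get? "state" == some "expanded" then
      match t.get? "child_story" with
      | some c => if c ≠ "" then some c else none
      | none => none
    else none)

-- Pre_ excludes the inputs on which a cycle of the children graph is reachable from some
-- upgradable token's child story: there A's unbounded recursion overflows the stack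
-- (RecursionError). The graph-shape condition slightly over-approximates: a walk that is cut
-- short by a None child before the cycle still returns in A (see the cited excluded example).
def Pre_update_deep_solved_states (tokens : List (List (String × String))) (story_id : String) (story_tree : List (String × List (String × List (String × Option String)))) : Prop :=
  (let d := PySem.Dict.ofList story_tree
   (pvExpand d d.size (PySem.Set.ofList (pvRoots tokens))).all
     (fun k => !((pvExpand d d.size (PySem.Set.ofList (pvSuccs d k))).contains k))) = true
instance (tokens : List (List (String × String))) (story_id : String) (story_tree : List (String × List (String × List (String × Option String)))) : Decidable (Pre_update_deep_solved_states tokens story_id story_tree) := by unfold Pre_update_deep_solved_states; infer_instance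

def pvWitness_update_deep_solved_states : (List (List (String × String))) × String × (List (String × List (String × List (String × Option String)))) :=
  ([[("type", "nonce"), ("state", "expanded"), ("child_story", "s1")]], "root",
   [("s1", [("children", [("wug", some "s2")])]), ("s2", [("children", [])])])

def Spec_update_deep_solved_states (tokens : List (List (String × String))) (story_id : String) (story_tree : List (String × List (String × List (String × Option String)))) (out : List (List (String × String))) : Prop := out = update_deep_solved_states_alt tokens story_id story_tree
instance (tokens : List (List (String × String))) (story_id : String) (story_tree : List (String × List (String × List (String × Option String)))) (out : List (List (String × String))) : Decidable (Spec_update_deep_solved_states tokens story_id story_tree out) := by unfold Spec_update_deep_solved_states; infer_instance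

-- ===== CLAIM (what is proved, stated in full; the proofs are below) =====
def Claim_equal_update_deep_solved_states : Prop := ∀ (tokens : List (List (String × String))) (story_id : String) (story_tree : List (String × List (String × List (String × Option String)))), Dom_update_deep_solved_states tokens story_id story_tree → Pre_update_deep_solved_states tokens story_id story_tree → Spec_update_deep_solved_states tokens story_id story_tree (update_deep_solved_states tokens story_id story_tree)

-- ===== LEMMAS AND PROOFS =====

-- f-fold application of pvStep, no early exit
def pvPow (d : PySem.Dict String (List (String × List (String × Option String)))) : Nat → List String → List String
  | 0, s => s
  | k+1, s => pvPow d k (pvStep d s)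

lemma pvPow_fix (d : PySem.Dict String (List (String × List (String × Option String)))) (s : List String)
    (h : pvStep d s = s) : ∀ k, pvPow d k s = s := by
  intro k
  induction k with
  | zero => rfl
  | succ k ih => simp [pvPow, h, ih]

lemma pvLoop_eq_pow (d : PySem.Dict String (List (String × List (String × Option String)))) :
    ∀ (k : Nat) (s : List String), pvLoop d k s = pvPow d k s := by
  intro k
  induction k with
  | zero => intro s; rfl
  | succ k ih =>
    intro s
    by_cases h : pvStep d s = s
    · simp [pvLoop, pvPow, h, pvPow_fix d s h]
    · simp [pvLoop, pvPow, h, ih]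

lemma pvPow_succ_out (d : PySem.Dict String (List (String × List (String × Option String)))) :
    ∀ (k : Nat) (s : List String), pvPow d (k + 1) s = pvStep d (pvPow d k s) := by
  intro k
  induction k with
  | zero => intro s; rfl
  | succ k ih =>
    intro s
    show pvPow d (k + 1) (pvStep d s) = _
    rw [ih]
    rfl

lemma mem_pvStep (d : PySem.Dict String (List (String × List (String × Option String))))
    (hk : d.keys.Nodup) (s : List String) (c : String) :
    c ∈ pvStep d s ↔ ∃ story, d.get? c = some story ∧ pvOk s story = true := by
  unfold pvStep
  simp only [List.mem_map, List.mem_filter]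
  constructor
  · rintro ⟨⟨k, story⟩, ⟨hmem, hok⟩, rfl⟩
    exact ⟨story, PySem.Dict.get?_of_mem_items d hmem hk, hok⟩
  · rintro ⟨story, hget, hok⟩
    exact ⟨(c, story), ⟨PySem.Dict.mem_items_of_get?_eq_some d hget, hok⟩, rfl⟩

lemma contains_pvStep (d : PySem.Dict String (List (String × List (String × Option String))))
    (hk : d.keys.Nodup) (s : List String) (c : String) :
    (pvStep d s).contains c =
      (match d.get? c with
       | none => false
       | some story => pvOk s story) := by
  cases hget : d.get? c with
  | none =>
    simp only []
    rw [Bool.eq_false_iff]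
    intro hc
    rw [List.contains_iff_mem] at hc
    obtain ⟨story, hg, _⟩ := (mem_pvStep d hk s c).mp hc
    rw [hget] at hg
    simp at hg
  | some story =>
    simp only []
    rcases hok : pvOk s story with _ | _
    · rw [Bool.eq_false_iff]
      intro hc
      rw [List.contains_iff_mem] at hc
      obtain ⟨story', hg, hok'⟩ := (mem_pvStep d hk s c).mp hc
      rw [hget] at hg
      injection hg with hg'
      rw [← hg', hok] at hok'
      exact Bool.noConfusion hok'
    · rw [List.contains_iff_mem]
      exact (mem_pvStep d hk s c).mpr ⟨story, hget, hok⟩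

-- the round results, counted from the empty set
def pvIter (d : PySem.Dict String (List (String × List (String × Option String)))) : Nat → List String
  | 0 => []
  | f+1 => pvStep d (pvIter d f)

lemma pvIter_eq_pow (d : PySem.Dict String (List (String × List (String × Option String)))) :
    ∀ f, pvIter d f = pvPow d f [] := by
  intro f
  induction f with
  | zero => rfl
  | succ f ih =>
    show pvStep d (pvIter d f) = _
    rw [ih, ← pvPow_succ_out]

-- naive recursion with fuel f = membership in the f-th round
lemma isDeepSolved_eq_iter (d : PySem.Dict String (List (String × List (String × Option String))))
    (hk : d.keys.Nodup) : ∀ (f : Nat) (c : String),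
    pvIsDeepSolved d f c = (pvIter d f).contains c := by
  intro f
  induction f with
  | zero => intro c; rfl
  | succ f ih =>
    intro c
    show pvIsDeepSolved d (f + 1) c = (pvStep d (pvIter d f)).contains c
    rw [contains_pvStep d hk (pvIter d f) c]
    unfold pvIsDeepSolved
    cases hget : d.get? c with
    | none => rfl
    | some story =>
      simp only [pvOk]
      by_cases hemp : story.isEmpty
      · simp [hemp]
      · simp only [hemp, Bool.false_eq_true, if_false, PySem.Dict.values, List.all_map]
        refine List.all_congr rfl (fun p => ?_)
        show _ = (fun c => match c with | none => false | some cid => (pvIter d f).contains cid) p.2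
        cases p.2 with
        | none => rfl
        | some cid => exact ih cid

theorem update_deep_solved_states_spec_aux (tokens : List (List (String × String))) (story_id : String)
    (story_tree : List (String × List (String × List (String × Option String)))) :
    update_deep_solved_states tokens story_id story_tree
      = update_deep_solved_states_alt tokens story_id story_tree := by
  unfold update_deep_solved_states update_deep_solved_states_alt
  have hk : (PySem.Dict.ofList story_tree).keys.Nodup := PySem.Dict.nodup_keys_ofList story_tree
  have hsolve : ∀ c, pvIsDeepSolved (PySem.Dict.ofList story_tree) (story_tree.length + 1) c
      = (pvLoop (PySem.Dict.ofList story_tree) (story_tree.length + 1) []).contains c := by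
    intro c
    rw [pvLoop_eq_pow, ← pvIter_eq_pow, isDeepSolved_eq_iter _ hk]
  simp only [hsolve]

-- ===== VERDICT (by name: the statement is the Claim_ definition above) =====
theorem update_deep_solved_states_spec : Claim_equal_update_deep_solved_states := by
  intro tokens story_id story_tree _ _
  unfold Spec_update_deep_solved_states
  exact update_deep_solved_states_spec_aux tokens story_id story_tree
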